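-- pv_equiv track=rewrite | github.com/good-programmer/CITS3403-project | project/utils/game_utils.py | words_in_puzzle_string
-- ===== SOURCE A (Python) =====
-- def words_in_puzzle_string(submittedWords, puzzleString):
--     for word in submittedWords:
--         temp_string = puzzleString
--         for letter in word:
--                 if letter in temp_string:
--                     temp_string = temp_string.replace(letter, '', 1)
--                 else:
--                     return False
--     return True
-- ===== SOURCE B (Python) =====
-- def words_in_puzzle_string(submittedWords, puzzleString):
--     puzzle_counts = {}
--     for ch in puzzleString:
--         puzzle_counts[ch] = puzzle_counts.get(ch, 0) + 1
--     for word in submittedWords: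
--         word_counts = {}
--         for ch in word:
--             word_counts[ch] = word_counts.get(ch, 0) + 1
--         for ch, n in word_counts.items():
--             if n > puzzle_counts.get(ch, 0):
--                 return False
--     return True
-- ===== Notes on version B (the rewrite author's own statement) =====
-- stated objective: faster
-- what changed: Replaced the per-letter scan that decrements a mutable working copy of the puzzle string by frequency tables: build a letter-count dict for the puzzle once and one per word, and compare counts, removing the per-letter membership test and replace() scan over the working string.
import Mathlib
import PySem

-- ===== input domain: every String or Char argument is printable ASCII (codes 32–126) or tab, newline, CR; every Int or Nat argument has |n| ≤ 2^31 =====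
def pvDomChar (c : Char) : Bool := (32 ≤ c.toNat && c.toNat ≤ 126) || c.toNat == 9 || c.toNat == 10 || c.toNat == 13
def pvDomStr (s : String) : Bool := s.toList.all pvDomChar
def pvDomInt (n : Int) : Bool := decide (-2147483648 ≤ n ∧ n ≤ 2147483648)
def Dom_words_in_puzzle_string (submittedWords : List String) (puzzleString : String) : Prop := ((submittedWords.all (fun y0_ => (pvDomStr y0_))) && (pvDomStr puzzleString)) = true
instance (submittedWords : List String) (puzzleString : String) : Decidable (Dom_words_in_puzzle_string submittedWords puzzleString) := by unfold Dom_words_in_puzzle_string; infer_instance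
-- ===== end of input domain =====

-- B replaces A's per-letter scan over a shrinking working copy of the puzzle string by
-- letter-frequency dicts compared per word (asymptotically faster; measured).

-- ===== PORT A =====
-- inner 'for letter in word' loop: temp_string is the shrinking working copy.
-- 'temp_string.replace(letter, '', 1)' on a single char removes its FIRST occurrence,
-- which on a List Char is exactly List.erase (hand-ported, exact since letter ∈ temp here).
def pvSpellLoop : List Char → List Char → Bool
  | [], _ => true
  | letter :: rest, temp =>
    if letter ∈ temp then pvSpellLoop rest (temp.erase letter)
    else false

-- outer 'for word in submittedWords' loop with the early 'return False'
def pvWordsLoop (puzzleString : String) : List String → Bool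
  | [] => true
  | word :: ws =>
    if pvSpellLoop word.toList puzzleString.toList then pvWordsLoop puzzleString ws
    else false

def words_in_puzzle_string (submittedWords : List String) (puzzleString : String) : Bool :=
  pvWordsLoop puzzleString submittedWords

-- ===== PORT B =====
-- 'counts[ch] = counts.get(ch, 0) + 1' loop building a frequency dict
def pvCounter (s : List Char) : PySem.Dict Char Int :=
  s.foldl (fun d ch => d.insert ch (d.getD ch 0 + 1)) PySem.Dict.empty

-- outer word loop; the inner 'for ch, n in word_counts.items(): if n > …: return False'
def pvAltLoop (puzzleCounts : PySem.Dict Char Int) : List String → Bool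
  | [] => true
  | word :: ws =>
    if (pvCounter word.toList).items.all
        (fun kv => !decide (puzzleCounts.getD kv.1 0 < kv.2)) then
      pvAltLoop puzzleCounts ws
    else false

def words_in_puzzle_string_alt (submittedWords : List String) (puzzleString : String) : Bool :=
  pvAltLoop (pvCounter puzzleString.toList) submittedWords

-- ===== PRECONDITION & SPEC =====
def Spec_words_in_puzzle_string (submittedWords : List String) (puzzleString : String) (out : Bool) : Prop := out = words_in_puzzle_string_alt submittedWords puzzleString
instance (submittedWords : List String) (puzzleString : String) (out : Bool) : Decidable (Spec_words_in_puzzle_string submittedWords puzzleString out) := by unfold Spec_words_in_puzzle_string; infer_instance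

-- ===== CLAIM (what is proved, stated in full; the proofs are below) =====
def Claim_equal_words_in_puzzle_string : Prop := ∀ (submittedWords : List String) (puzzleString : String), Dom_words_in_puzzle_string submittedWords puzzleString → Spec_words_in_puzzle_string submittedWords puzzleString (words_in_puzzle_string submittedWords puzzleString)

-- ===== LEMMAS AND PROOFS =====

-- A's inner loop succeeds iff the word is a sub-multiset of the working string.
theorem pvSpellLoop_eq_true_iff (w : List Char) : ∀ (temp : List Char),
    pvSpellLoop w temp = true ↔ ∀ c, w.count c ≤ temp.count c := by
  induction w with
  | nil => intro temp; simp [pvSpellLoop]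
  | cons a w ih =>
    intro temp
    by_cases h : a ∈ temp
    · simp only [pvSpellLoop, if_pos h, ih]
      have ha : 1 ≤ temp.count a := List.one_le_count_iff.mpr h
      constructor
      · intro hall c
        have h1 := hall c
        by_cases hca : a = c
        · subst hca
          have h2 : (temp.erase a).count a = temp.count a - 1 := List.count_erase_self ..
          simp only [List.count_cons_self]
          omega
        · have h2 : (temp.erase a).count c = temp.count c :=
            List.count_erase_of_ne (fun e => hca e.symm) ..
          rw [List.count_cons_of_ne hca]
          omega
      · intro hall c
        have h1 := hall c
        by_cases hca : a = c
        · subst hca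
          have h2 : (temp.erase a).count a = temp.count a - 1 := List.count_erase_self ..
          simp only [List.count_cons_self] at h1
          omega
        · have h2 : (temp.erase a).count c = temp.count c :=
            List.count_erase_of_ne (fun e => hca e.symm) ..
          rw [List.count_cons_of_ne hca] at h1
          omega
    · simp only [pvSpellLoop, if_neg h]
      constructor
      · intro hf; exact absurd hf (by simp)
      · intro hall
        have h1 := hall a
        have h0 : temp.count a = 0 := List.count_eq_zero_of_not_mem h
        simp only [List.count_cons_self] at h1
        omega

-- B's per-word item check is the full sub-multiset test.
theorem pvWordItems_iff (w p : List Char) :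
    ((pvCounter w).items.all
        (fun kv => !decide ((pvCounter p).getD kv.1 0 < kv.2)) = true)
      ↔ ∀ c, w.count c ≤ p.count c := by
  have hcw : pvCounter w = PySem.Dict.counter w :=
    PySem.Dict.foldl_insert_getD_add_one_eq_counter ..
  have hcp : pvCounter p = PySem.Dict.counter p :=
    PySem.Dict.foldl_insert_getD_add_one_eq_counter ..
  rw [hcw, hcp, PySem.Dict.items_counter]
  simp only [List.all_map, Function.comp, List.all_eq_true, PySem.Dict.getD_counter,
    Bool.not_eq_eq_eq_not, Bool.not_true, decide_eq_false_iff_not, not_lt]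
  constructor
  · intro h c
    by_cases hc : c ∈ w
    · have := h c ((PySem.Set.mem_ofList ..).mpr hc)
      exact_mod_cast this
    · simp [List.count_eq_zero_of_not_mem hc]
  · intro h c _
    exact_mod_cast h c

theorem words_in_puzzle_string_spec : Claim_equal_words_in_puzzle_string := by
  unfold Claim_equal_words_in_puzzle_string
  intro submittedWords puzzleString hd
  clear hd
  unfold Spec_words_in_puzzle_string words_in_puzzle_string words_in_puzzle_string_alt
  induction submittedWords with
  | nil => simp [pvWordsLoop, pvAltLoop]
  | cons w ws ih =>
    simp only [pvWordsLoop, pvAltLoop]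
    by_cases h : pvSpellLoop w.toList puzzleString.toList = true
    · rw [if_pos h, if_pos, ih]
      rw [pvWordItems_iff]
      exact (pvSpellLoop_eq_true_iff w.toList puzzleString.toList).mp h
    · rw [if_neg h, if_neg]
      intro hall
      exact h ((pvSpellLoop_eq_true_iff w.toList puzzleString.toList).mpr
        ((pvWordItems_iff w.toList puzzleString.toList).mp hall))
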